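-- pv_equiv track=rewrite | github.com/Youva-git/IA-jeu-chifoumi | fonction.py | calc
-- ===== SOURCE A (Python) =====
-- def calc(taille,nb):
--       x,y =0,0
--       for i in range(1,nb):
--         x +=1
--         if(x == taille):
--           y+=1
--           x = 0
--       return y,x
-- ===== SOURCE B (Python) =====
-- def calc(taille, nb):
--     n = max(nb - 1, 0)
--     if taille <= 0:
--         return 0, n
--     return divmod(n, taille)
-- ===== Notes on version B (the rewrite author's own statement) =====
-- stated objective: faster
-- what changed: Replaces the O(nb) increment loop by a closed-form divmod of max(nb-1,0) by taille (with taille<=0 handled as 0 full cycles).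
import Mathlib
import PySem

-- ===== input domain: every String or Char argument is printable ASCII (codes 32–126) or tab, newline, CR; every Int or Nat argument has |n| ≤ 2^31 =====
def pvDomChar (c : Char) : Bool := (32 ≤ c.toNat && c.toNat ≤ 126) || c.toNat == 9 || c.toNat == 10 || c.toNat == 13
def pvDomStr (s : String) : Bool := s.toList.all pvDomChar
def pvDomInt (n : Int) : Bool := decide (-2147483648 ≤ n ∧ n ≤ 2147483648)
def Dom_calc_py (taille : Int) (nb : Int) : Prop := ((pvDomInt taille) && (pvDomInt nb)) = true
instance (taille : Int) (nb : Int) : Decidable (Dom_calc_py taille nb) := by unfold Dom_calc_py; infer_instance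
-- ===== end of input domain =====

-- B replaces A's O(nb) increment loop with a closed-form divmod; objective: faster (asymptotic).


-- ===== PORT A =====
-- for i in range(1,nb): x += 1; if x == taille: y += 1; x = 0   — state carried as (x, y)
def calc_py (taille : Int) (nb : Int) : Int × Int :=
  let s := (PySem.List.pyRange 1 nb 1).foldl
    (fun (s : Int × Int) (_i : Int) =>
      let x := s.1 + 1
      if x = taille then (0, s.2 + 1) else (x, s.2))
    (0, 0)
  (s.2, s.1)

-- ===== PORT B =====
def calc_py_alt (taille : Int) (nb : Int) : Int × Int :=
  let n := max (nb - 1) 0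
  if taille ≤ 0 then (0, n)
  else (PySem.Int.floordiv n taille, PySem.Int.mod n taille)

-- ===== PRECONDITION & SPEC =====
def Spec_calc_py (taille : Int) (nb : Int) (out : Int × Int) : Prop := out = calc_py_alt taille nb
instance (taille : Int) (nb : Int) (out : Int × Int) : Decidable (Spec_calc_py taille nb out) := by unfold Spec_calc_py; infer_instance

-- ===== CLAIM (what is proved, stated in full; the proofs are below) =====
def Claim_equal_calc_py : Prop := ∀ (taille : Int) (nb : Int), Dom_calc_py taille nb → Spec_calc_py taille nb (calc_py taille nb)

-- ===== LEMMAS AND PROOFS =====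

-- The loop body only depends on the number of iterations, so fold over any list from state (x,y):
-- taille ≤ 0, 0 ≤ x: x never gets reset.
theorem calc_loop_nonpos (taille : Int) (ht : taille ≤ 0) (l : List Int) :
    ∀ (x y : Int), 0 ≤ x →
      l.foldl (fun (s : Int × Int) (_i : Int) =>
        let x := s.1 + 1
        if x = taille then (0, s.2 + 1) else (x, s.2)) (x, y)
      = (x + l.length, y) := by
  induction l with
  | nil => intro x y hx; simp
  | cons a t ih =>
    intro x y hx
    have hne : ¬ (x + 1 = taille) := by omega
    simp only [List.foldl_cons, List.length_cons]
    rw [if_neg hne, ih (x + 1) y (by omega)]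
    simp; ring

-- 0 < taille, 0 ≤ x < taille: result is divmod of (x + length) by taille.
theorem calc_loop_pos (taille : Int) (ht : 0 < taille) (l : List Int) :
    ∀ (x y : Int), 0 ≤ x → x < taille →
      l.foldl (fun (s : Int × Int) (_i : Int) =>
        let x := s.1 + 1
        if x = taille then (0, s.2 + 1) else (x, s.2)) (x, y)
      = ((x + l.length) % taille, y + (x + l.length) / taille) := by
  induction l with
  | nil => intro x y hx hxt
           simp [Int.emod_eq_of_lt hx hxt, Int.ediv_eq_zero_of_lt hx hxt]
  | cons a t ih =>
    intro x y hx hxt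
    simp only [List.foldl_cons, List.length_cons]
    by_cases h : x + 1 = taille
    · rw [if_pos h, ih 0 (y + 1) le_rfl ht]
      have hmod : (0 + (t.length : Int)) % taille = (x + ((t.length : Int) + 1)) % taille := by
        have : x + ((t.length : Int) + 1) = (0 + (t.length : Int)) + taille * 1 := by omega
        rw [this, Int.add_mul_emod_self_left]
      have hdiv : y + 1 + (0 + (t.length : Int)) / taille
          = y + (x + ((t.length : Int) + 1)) / taille := by
        have h2 : x + ((t.length : Int) + 1) = (0 + (t.length : Int)) + 1 * taille := by omega
        rw [h2, Int.add_mul_ediv_right _ _ (by omega : taille ≠ 0)]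
        ring
      rw [hmod, hdiv]
      push_cast
      ring_nf
    · rw [if_neg h, ih (x + 1) y (by omega) (by omega)]
      have : x + 1 + (t.length : Int) = x + ((t.length : Int) + 1) := by ring
      rw [this]
      push_cast
      ring_nf

theorem calc_py_spec : Claim_equal_calc_py := by
  intro taille nb _
  unfold Spec_calc_py calc_py calc_py_alt
  have hlen : ((PySem.List.pyRange 1 nb 1).length : Int) = max (nb - 1) 0 := by
    rw [PySem.List.length_pyRange_one]
    omega
  by_cases ht : taille ≤ 0
  · rw [if_pos ht]
    simp only [calc_loop_nonpos taille ht _ 0 0 le_rfl]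
    rw [hlen]; simp
  · rw [if_neg ht]
    have htp : 0 < taille := by omega
    simp only [calc_loop_pos taille htp _ 0 0 le_rfl htp]
    rw [PySem.Int.floordiv_eq_ediv_of_pos htp, PySem.Int.mod_eq_emod_of_pos htp, hlen]
    simp
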